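-- pv_equiv track=rewrite | github.com/Park-EunBi/algorithm | 2023/programmers/위장.py | solution
-- ===== SOURCE A (Python) =====
-- def solution(clothes):
--     # 해시 테이블 생성
--     wear = {}
--     for c in clothes:
--         if c[1] not in wear:
--             wear[c[1]] = 1
--         else:
--             wear[c[1]] += 1
--
--     # 테이블의 (value + 1) 해서 다 더하고 -1
--     res = 1
--     for w in wear:
--         res *= (wear[w] + 1)
--     return res -1
-- ===== SOURCE B (Python) =====
-- def solution(clothes):
--     # sort by category, then multiply (run length + 1) over each run of equal categories
--     ordered = sorted(clothes, key=lambda c: c[1])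
--     res = 1
--     i, n = 0, len(ordered)
--     while i < n:
--         j = i
--         while j < n and ordered[j][1] == ordered[i][1]:
--             j += 1
--         res *= (j - i + 1)
--         i = j
--     return res - 1
-- ===== Notes on version B (the rewrite author's own statement) =====
-- stated objective: alternative
-- what changed: Replaced the dict-based category frequency table with a sort-by-category followed by a single run-length scan whose running product of (run length + 1) gives the same result.
import Mathlib
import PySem

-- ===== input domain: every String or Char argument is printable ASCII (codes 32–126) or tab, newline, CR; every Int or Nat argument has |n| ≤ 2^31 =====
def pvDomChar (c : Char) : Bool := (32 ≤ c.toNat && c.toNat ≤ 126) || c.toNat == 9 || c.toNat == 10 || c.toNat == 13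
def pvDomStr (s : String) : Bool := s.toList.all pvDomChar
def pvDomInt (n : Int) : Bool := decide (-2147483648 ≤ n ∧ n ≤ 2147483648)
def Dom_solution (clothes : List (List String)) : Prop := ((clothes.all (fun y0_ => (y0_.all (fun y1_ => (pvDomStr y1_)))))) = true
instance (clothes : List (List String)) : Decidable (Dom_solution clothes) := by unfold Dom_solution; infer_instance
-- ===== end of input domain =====

-- B replaces A's dict frequency table by a sort-by-category plus run-length scan; objective: alternative (same value, different traversal).

-- key of a clothes item: c[1] (outside Pre_ the Python raises IndexError; the port defaults to "")
def keyOf (c : List String) : String := (PySem.List.pyGet? c 1).getD ""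

-- ===== PORT A =====
def solution (clothes : List (List String)) : Int :=
  let wear := clothes.foldl (fun d c =>
    let k := keyOf c
    if d.contains k = false then d.insert k 1 else d.insert k (d.getD k 0 + 1))
    (PySem.Dict.empty : PySem.Dict String Int)
  let res := wear.keys.foldl (fun r w => r * (wear.getD w 0 + 1)) 1
  res - 1

-- ===== PORT B =====
-- the inner while loop: the run of items sharing the head's category, then the rest
def groupProd : List (List String) → Int
  | [] => 1
  | c :: rest =>
      (((rest.takeWhile (fun d => keyOf d == keyOf c)).length : Int) + 1 + 1) *
        groupProd (rest.dropWhile (fun d => keyOf d == keyOf c))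
termination_by l => l.length
decreasing_by
  have := List.Sublist.length_le (List.dropWhile_sublist (l := rest) (p := fun d => keyOf d == keyOf c))
  simp only [List.length_cons]; omega

def solution_alt (clothes : List (List String)) : Int :=
  groupProd (PySem.List.sorted clothes keyOf) - 1

-- ===== PRECONDITION & SPEC =====
-- Pre_ excludes exactly the inputs on which Python A raises IndexError: an item with fewer than 2 entries.
def Pre_solution (clothes : List (List String)) : Prop := ∀ c ∈ clothes, 2 ≤ c.length
instance (clothes : List (List String)) : Decidable (Pre_solution clothes) := by unfold Pre_solution; infer_instance
def pvWitness_solution : List (List String) := [["a", "top"], ["b", "top"], ["c", "pants"]]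
def Spec_solution (clothes : List (List String)) (out : Int) : Prop := out = solution_alt clothes
instance (clothes : List (List String)) (out : Int) : Decidable (Spec_solution clothes out) := by unfold Spec_solution; infer_instance

-- ===== CLAIM (what is proved, stated in full; the proofs are below) =====
def Claim_equal_solution : Prop := ∀ (clothes : List (List String)), Dom_solution clothes → Pre_solution clothes → Spec_solution clothes (solution clothes)

-- ===== LEMMAS AND PROOFS =====

-- a multiplying foldl is init * product of the mapped list
theorem foldl_mul_eq_prod {α : Type} (f : α → Int) :
    ∀ (l : List α) (init : Int), l.foldl (fun r x => r * f x) init = init * (l.map f).prod := by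
  intro l
  induction l with
  | nil => intro init; simp
  | cons a t ih => intro init; simp [List.foldl_cons, ih, mul_assoc]

-- A's dict-building step is the counter step
theorem stepA_eq (d : PySem.Dict String Int) (c : List String) :
    (if d.contains (keyOf c) = false then d.insert (keyOf c) 1
     else d.insert (keyOf c) (d.getD (keyOf c) 0 + 1))
      = d.insert (keyOf c) (d.getD (keyOf c) 0 + 1) := by
  by_cases h : d.contains (keyOf c) = false
  · rw [if_pos h, PySem.Dict.getD_of_not_contains d (0 : Int) h, zero_add]
  · rw [if_neg h]

-- A computes the product over the first-occurrence-distinct categories of (count + 1), minus 1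
theorem solution_eq_prod (clothes : List (List String)) :
    solution clothes =
      ((PySem.Set.ofList (clothes.map keyOf)).map
        (fun k => ((clothes.map keyOf).count k + 1 : Int))).prod - 1 := by
  simp only [solution]
  have h1 : clothes.foldl (fun d c =>
      if d.contains (keyOf c) = false then d.insert (keyOf c) 1
      else d.insert (keyOf c) (d.getD (keyOf c) 0 + 1))
      (PySem.Dict.empty : PySem.Dict String Int)
      = PySem.Dict.counter (clothes.map keyOf) := by
    rw [← PySem.Dict.foldl_insert_getD_add_one_eq_counter (clothes.map keyOf), List.foldl_map]
    exact PySem.List.foldl_congr_mem clothes _ _ _ (fun d c _ => stepA_eq d c)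
  rw [h1, PySem.Dict.keys_counter,
      foldl_mul_eq_prod (fun w => (PySem.Dict.counter (clothes.map keyOf)).getD w 0 + 1)]
  simp [PySem.Dict.getD_counter]

-- dedup of a block of copies of k followed by a k-free tail
theorem dedup_run {α : Type} [DecidableEq α] (k : α) :
    ∀ (run : List α), (∀ x ∈ run, x = k) → ∀ t : List α, k ∉ t →
      (k :: (run ++ t)).dedup = k :: t.dedup := by
  intro run
  induction run with
  | nil => intro _ t ht; simp [List.dedup_cons_of_notMem ht]
  | cons a r ih =>
      intro h t ht
      have ha : a = k := h a (by simp)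
      subst ha
      rw [List.cons_append, List.dedup_cons_of_mem (show a ∈ a :: (r ++ t) by simp)]
      exact ih (fun x hx => h x (by simp [hx])) t ht

-- the first element of a dropWhile fails the predicate
theorem dropWhile_head_false {α : Type} (p : α → Bool) :
    ∀ (l : List α) (e : α) (t : List α), l.dropWhile p = e :: t → p e = false := by
  intro l
  induction l with
  | nil => intro e t h; simp [List.dropWhile] at h
  | cons a r ih =>
      intro e t h
      rw [List.dropWhile_cons] at h
      by_cases hp : p a
      · simp only [hp, if_true] at h; exact ih e t h
      · rw [if_neg (by simp [hp])] at h
        injection h with h1 _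
        rw [← h1]; simpa using hp

-- core: on a list whose keys are sorted, the run-length product is the per-category product
theorem groupProd_eq (l : List (List String)) (hs : (l.map keyOf).Pairwise (· ≤ ·)) :
    groupProd l = (((l.map keyOf).dedup).map
      (fun k => (((l.map keyOf).count k : Int) + 1))).prod := by
  match l with
  | [] => simp [groupProd]
  | c :: rest =>
    set p : List String → Bool := fun d => keyOf d == keyOf c with hp
    have hs' : List.Pairwise (· ≤ ·) (keyOf c :: rest.map keyOf) := by
      rw [List.map_cons] at hs; exact hs
    have hsplit : rest.takeWhile p ++ rest.dropWhile p = rest := List.takeWhile_append_dropWhile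
    have hrun : ∀ x ∈ rest.takeWhile p, keyOf x = keyOf c := by
      intro x hx
      have := List.mem_takeWhile_imp hx
      simpa [hp] using this
    -- everything after the run has a strictly larger key
    have hrest' : ∀ x ∈ rest.dropWhile p, keyOf c < keyOf x := by
      intro x hx
      have hle : ∀ y ∈ rest, keyOf c ≤ keyOf y := by
        intro y hy
        exact (List.pairwise_cons.mp hs').1 (keyOf y) (List.mem_map_of_mem hy)
      cases hd : rest.dropWhile p with
      | nil => rw [hd] at hx; simp at hx
      | cons e t =>
        have he : p e = false := dropWhile_head_false p rest e t hd
        have hne : keyOf e ≠ keyOf c := by simpa [hp] using he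
        have hsub : (e :: t).Sublist rest := by rw [← hd]; exact List.dropWhile_sublist p
        have hemem : e ∈ rest := hsub.mem (by simp)
        have hce : keyOf c < keyOf e := lt_of_le_of_ne (hle e hemem) (Ne.symm hne)
        rw [hd] at hx
        rcases List.mem_cons.mp hx with rfl | hxt
        · exact hce
        · have hpair : ((e :: t).map keyOf).Pairwise (· ≤ ·) :=
            List.Pairwise.sublist (hsub.map keyOf) (List.pairwise_cons.mp hs').2
          have hpair' : List.Pairwise (· ≤ ·) (keyOf e :: t.map keyOf) := by
            rw [List.map_cons] at hpair; exact hpair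
          exact lt_of_lt_of_le hce
            ((List.pairwise_cons.mp hpair').1 (keyOf x) (List.mem_map_of_mem hxt))
    have hnot : keyOf c ∉ (rest.dropWhile p).map keyOf := by
      intro hmem
      rcases List.mem_map.mp hmem with ⟨x, hx, hkx⟩
      exact absurd hkx (ne_of_gt (hrest' x hx))
    have hkeys : (c :: rest).map keyOf
        = keyOf c :: ((rest.takeWhile p).map keyOf ++ (rest.dropWhile p).map keyOf) := by
      rw [List.map_cons, ← List.map_append, hsplit]
    have hdedup : ((c :: rest).map keyOf).dedup
        = keyOf c :: ((rest.dropWhile p).map keyOf).dedup := by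
      rw [hkeys]
      exact dedup_run (keyOf c) _ (by
        intro x hx
        rcases List.mem_map.mp hx with ⟨y, hy, hky⟩
        rw [← hky]; exact hrun y hy) _ hnot
    have hcount_c : ((c :: rest).map keyOf).count (keyOf c)
        = (rest.takeWhile p).length + 1 := by
      rw [hkeys, List.count_cons_self, List.count_append]
      have h1 : ((rest.takeWhile p).map keyOf).count (keyOf c)
          = ((rest.takeWhile p).map keyOf).length := by
        rw [List.count_eq_length]
        intro b hb
        rcases List.mem_map.mp hb with ⟨y, hy, hky⟩
        rw [← hky]; exact (hrun y hy).symm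
      have h2 : ((rest.dropWhile p).map keyOf).count (keyOf c) = 0 :=
        List.count_eq_zero.mpr hnot
      rw [h1, h2, List.length_map]
    have hcount_ne : ∀ k, k ≠ keyOf c →
        ((c :: rest).map keyOf).count k = ((rest.dropWhile p).map keyOf).count k := by
      intro k hk
      rw [hkeys, List.count_cons_of_ne (Ne.symm hk), List.count_append]
      have h0 : ((rest.takeWhile p).map keyOf).count k = 0 := by
        rw [List.count_eq_zero]
        intro hmem
        rcases List.mem_map.mp hmem with ⟨y, hy, hky⟩
        exact hk (hky ▸ (hrun y hy) ▸ rfl)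
      omega
    have hpair'' : ((rest.dropWhile p).map keyOf).Pairwise (· ≤ ·) :=
      List.Pairwise.sublist ((List.dropWhile_sublist p).map keyOf) (List.pairwise_cons.mp hs').2
    have ih := groupProd_eq (rest.dropWhile p) hpair''
    rw [groupProd, hdedup, List.map_cons, List.prod_cons, hcount_c]
    have hmapeq : (((rest.dropWhile p).map keyOf).dedup).map
        (fun k => ((((c :: rest).map keyOf).count k : Int) + 1))
        = (((rest.dropWhile p).map keyOf).dedup).map
        (fun k => ((((rest.dropWhile p).map keyOf).count k : Int) + 1)) := by
      apply List.map_congr_left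
      intro k hk
      have hk' : k ≠ keyOf c := by
        intro h
        exact hnot (h ▸ List.mem_dedup.mp hk)
      rw [hcount_ne k hk']
    rw [hmapeq, ← ih]
    push_cast
    ring
termination_by l.length
decreasing_by
  have := List.Sublist.length_le (List.dropWhile_sublist (l := rest) (p := fun d => keyOf d == keyOf c))
  simp only [List.length_cons]; omega

-- B computes the same per-category product (over the sorted list, transported by the sort permutation)
theorem solution_alt_eq_prod (clothes : List (List String)) :
    solution_alt clothes =
      (((clothes.map keyOf).dedup).map
        (fun k => (((clothes.map keyOf).count k : Int) + 1))).prod - 1 := by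
  unfold solution_alt
  have hperm : (PySem.List.sorted clothes keyOf).Perm clothes :=
    PySem.List.sorted_perm clothes keyOf false
  have hpermk : ((PySem.List.sorted clothes keyOf).map keyOf).Perm (clothes.map keyOf) :=
    hperm.map keyOf
  rw [groupProd_eq _ (PySem.List.sorted_map_key_pairwise clothes keyOf)]
  congr 1
  calc ((((PySem.List.sorted clothes keyOf).map keyOf).dedup).map
          (fun k => ((((PySem.List.sorted clothes keyOf).map keyOf).count k : Int) + 1))).prod
      = ((((PySem.List.sorted clothes keyOf).map keyOf).dedup).map
          (fun k => (((clothes.map keyOf).count k : Int) + 1))).prod := by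
        congr 1
        exact List.map_congr_left (fun k _ => by rw [hpermk.count_eq k])
    _ = (((clothes.map keyOf).dedup).map
          (fun k => (((clothes.map keyOf).count k : Int) + 1))).prod :=
        (hpermk.dedup.map _).prod_eq

-- the first-occurrence key list and Mathlib's dedup are permutations, so the products agree
theorem ofList_perm_dedup (ks : List String) :
    (PySem.Set.ofList ks).Perm ks.dedup := by
  refine List.perm_of_nodup_nodup_toFinset_eq (PySem.Set.nodup_ofList ks) ks.nodup_dedup ?_
  ext a
  simp [PySem.Set.mem_ofList]

-- ===== VERDICT (by name: the statement is the Claim_ definition above) =====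
theorem solution_spec : Claim_equal_solution := by
  intro clothes _ _
  unfold Spec_solution
  rw [solution_eq_prod, solution_alt_eq_prod]
  congr 1
  exact ((ofList_perm_dedup (clothes.map keyOf)).map _).prod_eq
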